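-- pv_equiv track=rewrite | github.com/fowku/python-course-test | 4.py | mix_symbols
-- ===== SOURCE A (Python) =====
-- def mix_symbols(string: str):
--     """
--     Swap neighbour symbols in string
--     :param string:str
--     :return:str
--     """
--     string_arr = list(string)
--     temp: str
--
--     for i in range(0, len(string_arr) - 1, 2):
--         temp = string_arr[i]
--         string_arr[i] = string_arr[i + 1]
--         string_arr[i + 1] = temp
--
--     return ''.join(string_arr)
-- ===== SOURCE B (Python) =====
-- def mix_symbols(string: str):
--     """
--     Swap neighbour symbols in string
--     :param string:str
--     :return:str
--     """
--     even = string[::2]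
--     odd = string[1::2]
--     swapped = ''.join(b + a for a, b in zip(even, odd))
--     if len(string) % 2 != 0:
--         swapped += string[-1]
--     return swapped
-- ===== Notes on version B (the rewrite author's own statement) =====
-- stated objective: idiomatic
-- what changed: B replaces the index loop with in-place temp swaps over a char list by a slice/zip pass: it splits the string into the even- and odd-indexed subsequences with slicing and joins each pair reversed, appending the unpaired last character for odd lengths.
import Mathlib
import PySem

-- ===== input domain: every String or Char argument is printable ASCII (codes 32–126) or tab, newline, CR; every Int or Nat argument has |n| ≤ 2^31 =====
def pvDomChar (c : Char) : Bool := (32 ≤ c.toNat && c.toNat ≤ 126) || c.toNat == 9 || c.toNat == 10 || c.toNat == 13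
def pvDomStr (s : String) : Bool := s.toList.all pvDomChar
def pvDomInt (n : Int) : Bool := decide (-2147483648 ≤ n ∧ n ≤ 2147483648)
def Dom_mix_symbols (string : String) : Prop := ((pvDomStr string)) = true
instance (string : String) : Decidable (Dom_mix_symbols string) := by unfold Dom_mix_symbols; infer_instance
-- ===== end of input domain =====

-- B swaps neighbouring pairs via the even/odd slice subsequences and zip instead of A's in-place temp swaps over an index loop (idiomatic; same cost).

-- ===== PORT A =====
def mix_symbols (string : String) : String :=
  let string_arr := string.toList
  let string_arr :=
    (PySem.List.pyRange 0 (PySem.List.len string_arr - 1) 2).foldl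
      (fun arr i =>
        let temp := PySem.List.pyGetD arr i ' '
        let arr' := PySem.List.pySetD arr i (PySem.List.pyGetD arr (i + 1) ' ')
        PySem.List.pySetD arr' (i + 1) temp)
      string_arr
  String.ofList string_arr

-- ===== PORT B =====
def mix_symbols_alt (string : String) : String :=
  let cs := string.toList
  let even := (PySem.List.slice? cs none none 2).getD []
  let odd := (PySem.List.slice? cs (some 1) none 2).getD []
  let swapped := (even.zip odd).flatMap (fun p => [p.2, p.1])
  let swapped :=
    if PySem.Int.mod (PySem.List.len cs) 2 ≠ 0 then
      swapped ++ [PySem.List.pyGetD cs (-1) ' ']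
    else swapped
  String.ofList swapped

-- ===== PRECONDITION & SPEC =====
def Spec_mix_symbols (string : String) (out : String) : Prop := out = mix_symbols_alt string
instance (string : String) (out : String) : Decidable (Spec_mix_symbols string out) := by unfold Spec_mix_symbols; infer_instance

-- ===== CLAIM (what is proved, stated in full; the proofs are below) =====
def Claim_equal_mix_symbols : Prop := ∀ (string : String), Dom_mix_symbols string → Spec_mix_symbols string (mix_symbols string)

-- ===== LEMMAS AND PROOFS =====

/-- The common value of both programs on the character list: swap neighbouring pairs. -/
def pvSwapRec : List Char → List Char
  | [] => []
  | [a] => [a]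
  | a :: b :: t => b :: a :: pvSwapRec t

/-- A's loop body (the lambda inside `mix_symbols`). -/
def pvStepA (arr : List Char) (i : Int) : List Char :=
  let temp := PySem.List.pyGetD arr i ' '
  let arr' := PySem.List.pySetD arr i (PySem.List.pyGetD arr (i + 1) ' ')
  PySem.List.pySetD arr' (i + 1) temp

lemma pvStepA_zero (x y : Char) (arr : List Char) :
    pvStepA (x :: y :: arr) 0 = y :: x :: arr := by
  unfold pvStepA
  rw [show ((0:Int) + 1) = ((1 : Nat) : Int) by norm_num,
      show (0:Int) = ((0 : Nat) : Int) by norm_num]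
  rw [PySem.List.pyGetD_natCast, PySem.List.pyGetD_natCast,
      PySem.List.pySetD_natCast, PySem.List.pySetD_natCast]
  rfl

lemma pvStepA_shift (x y : Char) (arr : List Char) (n : Nat) :
    pvStepA (x :: y :: arr) ((n : Int) + 2) = x :: y :: pvStepA arr n := by
  unfold pvStepA
  rw [show ((n : Int) + 2 + 1) = ((n + 3 : Nat) : Int) by push_cast; ring,
      show ((n : Int) + 2) = ((n + 2 : Nat) : Int) by push_cast; ring,
      show ((n : Int) + 1) = ((n + 1 : Nat) : Int) by push_cast; ring]
  simp only [PySem.List.pyGetD_natCast, PySem.List.pySetD_natCast,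
    show n + 3 = (n + 1) + 1 + 1 from rfl, show n + 2 = (n + 1) + 1 from rfl,
    List.set_cons_succ, List.getD, List.getElem?_cons_succ]

lemma pvRange2_cons (a b : Int) (h : a < b) :
    PySem.List.pyRange a b 2 = a :: PySem.List.pyRange (a + 2) b 2 := by
  rw [PySem.List.pyRange_of_pos _ _ (by norm_num), PySem.List.pyRange_of_pos _ _ (by norm_num)]
  rw [if_pos h]
  rw [show ((b - a + 2 - 1) / 2).toNat
      = (if a + 2 < b then ((b - (a + 2) + 2 - 1) / 2).toNat else 0) + 1 by
    split_ifs with h2 <;> omega]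
  rw [List.range_succ_eq_map]
  simp [List.map_map, Function.comp_def, mul_add]
  intro k _
  ring

lemma pvRange2_shift (b : Int) :
    PySem.List.pyRange 2 b 2 = (PySem.List.pyRange 0 (b - 2) 2).map (· + 2) := by
  rw [PySem.List.pyRange_of_pos _ _ (by norm_num), PySem.List.pyRange_of_pos _ _ (by norm_num)]
  rw [show (if (0:Int) < b - 2 then ((b - 2 - 0 + 2 - 1) / 2).toNat else 0)
        = (if 2 < b then ((b - 2 + 2 - 1) / 2).toNat else 0) by split_ifs with h <;> omega]
  simp [List.map_map, Function.comp_def]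
  intro k _
  ring

lemma pvFoldl_shift (x y : Char) (r : List Int) (arr : List Char)
    (hr : ∀ i ∈ r, 0 ≤ i) :
    (r.map (· + 2)).foldl pvStepA (x :: y :: arr) = x :: y :: r.foldl pvStepA arr := by
  induction r generalizing arr with
  | nil => rfl
  | cons i r ih =>
    have hi : 0 ≤ i := hr i (List.mem_cons_self ..)
    obtain ⟨n, rfl⟩ : ∃ n : Nat, i = (n : Int) := ⟨i.toNat, (Int.toNat_of_nonneg hi).symm⟩
    simp only [List.map_cons, List.foldl_cons, pvStepA_shift]
    exact ih _ (fun j hj => hr j (List.mem_cons_of_mem _ hj))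

lemma pvLoopA : ∀ cs : List Char,
    (PySem.List.pyRange 0 (PySem.List.len cs - 1) 2).foldl pvStepA cs = pvSwapRec cs
  | [] => by simp [PySem.List.len, PySem.List.pyRange, pvSwapRec]
  | [a] => by
    have h0 : PySem.List.len [a] - 1 = 0 := by simp
    rw [h0, show PySem.List.pyRange 0 0 2 = [] from rfl]
    rfl
  | a :: b :: t => by
    have ih := pvLoopA t
    have hlen : PySem.List.len (a :: b :: t) - 1 = (t.length : Int) + 1 := by
      simp [PySem.List.len_eq]
    rw [hlen, pvRange2_cons 0 _ (by positivity), List.foldl_cons, pvStepA_zero,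
        show (0:Int) + 2 = 2 from by norm_num, pvRange2_shift,
        pvFoldl_shift b a _ t (fun i hi => by
          have := (PySem.List.mem_pyRange_iff_of_pos (by norm_num : (0:Int) < 2) i).mp hi
          omega)]
    rw [show (t.length : Int) + 1 - 2 = PySem.List.len t - 1 by simp [PySem.List.len_eq]; ring]
    rw [ih, pvSwapRec]

-- B side
/-- Even-indexed elements of a list. -/
def pvEvens {α : Type} : List α → List α
  | [] => []
  | [a] => [a]
  | a :: _ :: t => a :: pvEvens t

lemma pvEvens_cons {α : Type} (b : α) (t : List α) :
    pvEvens (b :: t) = b :: pvEvens t.tail := by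
  cases t <;> rfl

lemma pvFilterMapEvens {α : Type} : ∀ xs : List α,
    List.filterMap (fun k => xs[2 * k]?) (List.range ((xs.length + 1) / 2)) = pvEvens xs
  | [] => by simp [pvEvens]
  | [a] => by norm_num [List.range_succ, List.filterMap_cons, pvEvens]
  | a :: b :: t => by
    have ih := pvFilterMapEvens t
    rw [show ((a :: b :: t).length + 1) / 2 = (t.length + 1) / 2 + 1 by simp; omega]
    rw [List.range_succ_eq_map, List.filterMap_cons, List.filterMap_map]
    have hf : ((fun k => (a :: b :: t)[2 * k]?) ∘ Nat.succ) = fun k => t[2 * k]? := by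
      funext k
      simp [show 2 * Nat.succ k = 2 * k + 1 + 1 by omega]
    simp only [hf, ih]
    rfl

lemma pvSlice2 {α : Type} (xs : List α) :
    PySem.List.slice? xs none none 2 = some (pvEvens xs) := by
  simp only [PySem.List.slice?, PySem.List.sliceIndices]
  norm_num
  rw [show (if 0 < xs.length then (((xs.length : Int) + 2 - 1) / 2).toNat else 0)
        = (xs.length + 1) / 2 by split_ifs with h <;> omega]
  rw [show (fun (k : Nat) => xs[(2 * (k : Int)).toNat]?) = fun k => xs[2 * k]? by
    funext k; congr 1]
  exact pvFilterMapEvens xs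

lemma pvSlice12 {α : Type} : ∀ xs : List α,
    PySem.List.slice? xs (some 1) none 2 = some (pvEvens xs.tail)
  | [] => rfl
  | a :: t => by
    simp only [PySem.List.slice?, PySem.List.sliceIndices]
    norm_num
    rw [show (if 0 < t.length then (((t.length : Int) + 2 - 1) / 2).toNat else 0)
        = (t.length + 1) / 2 by split_ifs with h <;> omega]
    rw [show (fun (k : Nat) => (a :: t)[(1 + 2 * (k : Int)).toNat]?) = fun k => t[2 * k]? by
      funext k
      rw [show (1 + 2 * (k : Int)).toNat = 2 * k + 1 by omega]
      simp]
    exact pvFilterMapEvens t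

lemma pvAltList : ∀ cs : List Char,
    (((pvEvens cs).zip (pvEvens cs.tail)).flatMap (fun p => [p.2, p.1]))
      ++ (if PySem.Int.mod (PySem.List.len cs) 2 ≠ 0
            then [PySem.List.pyGetD cs (-1) ' '] else [])
      = pvSwapRec cs
  | [] => rfl
  | [a] => by
    rw [PySem.List.pyGetD_neg_one [a] ' ' (by simp)]
    rfl
  | a :: b :: t => by
    have ih := pvAltList t
    rw [show pvEvens (a :: b :: t) = a :: pvEvens t from rfl, List.tail_cons,
        pvEvens_cons, List.zip_cons_cons, List.flatMap_cons]
    have hmod : PySem.Int.mod (PySem.List.len (a :: b :: t)) 2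
        = PySem.Int.mod (PySem.List.len t) 2 := by
      rw [PySem.Int.mod_eq_emod_of_pos (by norm_num), PySem.Int.mod_eq_emod_of_pos (by norm_num)]
      simp only [PySem.List.len_eq, List.length_cons]
      push_cast
      omega
    rw [hmod]
    by_cases h : PySem.Int.mod (PySem.List.len t) 2 ≠ 0
    · have ht : t ≠ [] := by
        intro he; subst he; simp [PySem.List.len_eq, PySem.Int.mod] at h
      rw [if_pos h] at ih ⊢
      rw [PySem.List.pyGetD_neg_one (a :: b :: t) ' ' (by simp),
          List.getLast_cons (by simp), List.getLast_cons ht]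
      rw [← PySem.List.pyGetD_neg_one t ' ' ht]
      simpa [pvSwapRec] using congrArg (fun l => b :: a :: l) ih
    · rw [if_neg h] at ih ⊢
      simpa [pvSwapRec] using congrArg (fun l => b :: a :: l) ih

lemma pvIfAppend (c : Prop) [Decidable c] (xs : List Char) (e : Char) :
    (if c then xs ++ [e] else xs) = xs ++ (if c then [e] else []) := by
  split_ifs <;> simp

-- ===== VERDICT (by name: the statement is the Claim_ definition above) =====
theorem mix_symbols_spec : Claim_equal_mix_symbols := by
  intro s _
  unfold Spec_mix_symbols mix_symbols mix_symbols_alt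
  simp only
  rw [show (fun (arr : List Char) (i : Int) =>
        let temp := PySem.List.pyGetD arr i ' '
        let arr' := PySem.List.pySetD arr i (PySem.List.pyGetD arr (i + 1) ' ')
        PySem.List.pySetD arr' (i + 1) temp) = pvStepA from rfl]
  rw [pvLoopA s.toList, pvSlice2, pvSlice12, Option.getD_some, Option.getD_some]
  rw [pvIfAppend, pvAltList s.toList]
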